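-- pv_equiv track=rewrite | github.com/slavah8/leetcode | 2495-number-of-subarrays-having-even-product/2495-number-of-subarrays-having-even-product.py | evenProduct
-- ===== SOURCE A (Python) =====
-- from typing import List
--
-- def evenProduct(nums: List[int]) -> int:
--
--     n = len(nums)
--
--     # dp defined as number of even subarrays up to ith index
--     dp = [0] * (n + 1)
--     ans = 0
--
--     last_even = -1
--     for i in range(n):
--
--         x = nums[i]
--         if x % 2 == 0:
--             last_even = i
--             ans += i + 1
--         else:
--             if last_even != -1:
--                 ans += last_even + 1
--
--
--
--     return ans
-- ===== SOURCE B (Python) =====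
-- from typing import List
--
-- def evenProduct(nums: List[int]) -> int:
--     # total subarrays minus subarrays whose product is odd (maximal odd runs)
--     n = len(nums)
--     odd = 0
--     run = 0
--     for x in nums:
--         if x % 2:
--             run += 1
--             odd += run
--         else:
--             run = 0
--     return n * (n + 1) // 2 - odd
-- ===== Notes on version B (the rewrite author's own statement) =====
-- stated objective: simpler
-- what changed: B counts all n*(n+1)//2 subarrays and subtracts the odd-product ones via a running odd-run counter, instead of A's per-index last-even bookkeeping.
import Mathlib
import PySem

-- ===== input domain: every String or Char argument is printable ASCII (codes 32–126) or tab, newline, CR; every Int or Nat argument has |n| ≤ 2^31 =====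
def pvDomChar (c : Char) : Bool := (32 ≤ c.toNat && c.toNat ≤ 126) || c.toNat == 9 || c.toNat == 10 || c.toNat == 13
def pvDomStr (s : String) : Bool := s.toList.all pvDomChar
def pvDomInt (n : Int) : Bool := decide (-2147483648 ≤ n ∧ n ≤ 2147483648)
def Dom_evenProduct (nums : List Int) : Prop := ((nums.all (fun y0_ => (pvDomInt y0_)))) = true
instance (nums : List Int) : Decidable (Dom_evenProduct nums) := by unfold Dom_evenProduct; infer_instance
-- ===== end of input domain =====

-- B counts all subarrays with a closed form and subtracts odd-product runs (simpler bookkeeping than A).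
-- ===== PORT A =====
-- loop of A: index i, last_even, accumulator ans (A's dead local `dp` is omitted)
def evenProductGo : List Int → Int → Int → Int → Int
  | [], _, _, ans => ans
  | x :: rest, i, lastEven, ans =>
    if PySem.Int.mod x 2 = 0 then
      evenProductGo rest (i + 1) i (ans + (i + 1))
    else
      if lastEven ≠ -1 then
        evenProductGo rest (i + 1) lastEven (ans + (lastEven + 1))
      else
        evenProductGo rest (i + 1) lastEven ans

def evenProduct (nums : List Int) : Int :=
  evenProductGo nums 0 (-1) 0

-- ===== PORT B =====
-- loop of B: current odd-run length `run`, accumulator `odd`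
def evenProductAltGo : List Int → Int → Int → Int
  | [], _, odd => odd
  | x :: rest, run, odd =>
    if PySem.Int.mod x 2 ≠ 0 then
      evenProductAltGo rest (run + 1) (odd + (run + 1))
    else
      evenProductAltGo rest 0 odd

def evenProduct_alt (nums : List Int) : Int :=
  PySem.Int.floordiv ((nums.length : Int) * ((nums.length : Int) + 1)) 2 - evenProductAltGo nums 0 0

-- ===== PRECONDITION & SPEC =====
def Spec_evenProduct (nums : List Int) (out : Int) : Prop := out = evenProduct_alt nums
instance (nums : List Int) (out : Int) : Decidable (Spec_evenProduct nums out) := by unfold Spec_evenProduct; infer_instance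

-- ===== CLAIM (what is proved, stated in full; the proofs are below) =====
def Claim_equal_evenProduct : Prop := ∀ (nums : List Int), Dom_evenProduct nums → Spec_evenProduct nums (evenProduct nums)

-- ===== LEMMAS AND PROOFS =====

-- ===== VERDICT (by name: the statement is the Claim_ definition above) =====
-- Invariant linking the two loops: with lastEven + run + 1 = i and 0 ≤ run ≤ i,
-- twice the two accumulations sum to the number of subarray endpoints counted twice.
theorem evenProduct_key : ∀ (l : List Int) (i lastEven run ans odd : Int),
    lastEven + run + 1 = i → 0 ≤ run → run ≤ i →
    2 * evenProductGo l i lastEven ans + 2 * evenProductAltGo l run odd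
      = 2 * ans + 2 * odd + (i + (l.length : Int)) * (i + (l.length : Int) + 1) - i * (i + 1) := by
  intro l
  induction l with
  | nil => intro i lastEven run ans odd h1 h2 h3; simp only [evenProductGo, evenProductAltGo, List.length_nil]; push_cast; ring
  | cons x rest ih =>
    intro i lastEven run ans odd h1 h2 h3
    simp only [evenProductGo, evenProductAltGo, List.length_cons]
    by_cases hx : PySem.Int.mod x 2 = 0
    · rw [if_pos hx, if_neg (not_not_intro hx)]
      have := ih (i + 1) i 0 (ans + (i + 1)) odd (by omega) (by omega) (by omega)
      push_cast at this ⊢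
      rw [this]; ring
    · rw [if_neg hx, if_pos hx]
      by_cases hl : lastEven = -1
      · rw [if_neg (by simp [hl])]
        have hri : run = i := by omega
        have := ih (i + 1) lastEven (run + 1) ans (odd + (run + 1)) (by omega) (by omega) (by omega)
        push_cast at this ⊢
        rw [this, hri]; ring
      · rw [if_pos hl]
        have := ih (i + 1) lastEven (run + 1) (ans + (lastEven + 1)) (odd + (run + 1))
          (by omega) (by omega) (by omega)
        push_cast at this ⊢
        rw [this]; ring_nf; linarith

theorem evenProduct_spec : Claim_equal_evenProduct := by
  intro nums _
  show evenProduct nums = evenProduct_alt nums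
  have h := evenProduct_key nums 0 (-1) 0 0 0 (by omega) (by omega) (by omega)
  simp only [evenProduct, evenProduct_alt]
  have hm : (nums.length : Int) * ((nums.length : Int) + 1)
      = 2 * (evenProductGo nums 0 (-1) 0 + evenProductAltGo nums 0 0) := by
    ring_nf at h ⊢; linarith
  rw [hm, PySem.Int.floordiv_eq_ediv_of_pos (by omega), Int.mul_ediv_cancel_left _ (by omega)]
  omega
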